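-- pv_equiv track=rewrite | github.com/pbielak/aoc2023 | day13/main.py | find_vertical_reflection_idx
-- ===== SOURCE A (Python) =====
-- Pattern = list[str]
--
-- def find_vertical_reflection_idx(
--     pattern: Pattern,
--     accepted_diffs: int,
-- ) -> int | None:
--     idxs = []
--
--     for idx in range(len(pattern[0]) - 1):
--         cols_to_compare = [
--             (idx - i, idx + i + 1)
--             for i in range(idx + 1)
--             if idx - i >= 0 and idx + i + 1 < len(pattern[0])
--         ]
--
--         num_diffs = 0
--
--         for i, j in cols_to_compare:
--             num_diffs += compare_fn(
--                 first=[row[i] for row in pattern],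
--                 second=[row[j] for row in pattern],
--             )
--
--         if num_diffs == accepted_diffs:
--             idxs.append(idx)
--
--     if len(idxs) == 1:
--         return idxs[0]
--     elif len(idxs) == 0:
--         return None
--     else:
--         raise RuntimeError(
--             "Pattern should have at most one vertical reflection"
--         )
--
-- def compare_fn(first: str, second: str) -> int:
--     """Returns the number of different characters between the inputs."""
--     assert len(first) == len(second)
--     diff = len(first)
--
--     for a, b in zip(first, second):
--         if a == b:
--             diff -= 1
--
--     return diff
-- ===== SOURCE B (Python) =====
-- Pattern = list[str]
--
-- def find_vertical_reflection_idx(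
--     pattern: Pattern,
--     accepted_diffs: int,
-- ) -> int | None:
--     n = len(pattern[0])
--     idxs = [
--         idx
--         for idx in range(n - 1)
--         if sum(
--             a != b
--             for row in pattern
--             for a, b in zip(row[:idx + 1][::-1], row[idx + 1:n])
--         ) == accepted_diffs
--     ]
--     if len(idxs) > 1:
--         raise RuntimeError(
--             "Pattern should have at most one vertical reflection"
--         )
--     return idxs[0] if idxs else None
-- ===== Notes on version B (the rewrite author's own statement) =====
-- stated objective: simpler
-- what changed: A loops over mirror column pairs and rebuilds both full columns for each pair; B swaps the loop nesting and, per candidate axis, compares each row's reversed left slice against its right slice with zip, summing mismatches directly in a comprehension.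
import Mathlib
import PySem

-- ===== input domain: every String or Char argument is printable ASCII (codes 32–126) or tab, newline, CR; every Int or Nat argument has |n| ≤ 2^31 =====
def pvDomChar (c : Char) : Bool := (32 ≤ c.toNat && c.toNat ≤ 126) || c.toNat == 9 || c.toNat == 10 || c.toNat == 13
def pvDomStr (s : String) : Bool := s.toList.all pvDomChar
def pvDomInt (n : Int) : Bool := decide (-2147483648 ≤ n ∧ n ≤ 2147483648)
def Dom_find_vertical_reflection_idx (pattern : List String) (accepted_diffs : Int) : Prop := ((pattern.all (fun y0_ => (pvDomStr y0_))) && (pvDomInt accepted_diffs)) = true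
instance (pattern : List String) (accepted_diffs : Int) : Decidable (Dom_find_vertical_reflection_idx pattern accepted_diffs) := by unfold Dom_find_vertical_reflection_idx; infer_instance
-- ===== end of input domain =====

-- B swaps the loop nesting: per axis it compares each row's reversed left slice to its right
-- slice with zip, instead of rebuilding full column pairs; objective: simpler.


-- ===== PORT A =====
def compare_fn (first second : List Char) : Int :=
  let diff : Int := (first.length : Int)
  (first.zip second).foldl (fun diff ab => if ab.1 = ab.2 then diff - 1 else diff) diff

def find_vertical_reflection_idx (pattern : List String) (accepted_diffs : Int) : Option Int :=
  -- len(pattern[0]) raises on empty pattern: excluded by Pre_, headD "" there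
  let n : Int := ((pattern.headD "").toList.length : Int)
  let idxs : List Int := (PySem.List.pyRange 0 (n - 1) 1).foldl (fun idxs idx =>
    let cols_to_compare : List (Int × Int) :=
      (PySem.List.pyRange 0 (idx + 1) 1).filterMap (fun i =>
        if idx - i ≥ 0 ∧ idx + i + 1 < n then some (idx - i, idx + i + 1) else none)
    let num_diffs : Int := cols_to_compare.foldl (fun acc ij =>
      -- row[i]: in range under Pre_; pyGetD default is never used there
      acc + compare_fn
        (pattern.map (fun row => PySem.List.pyGetD row.toList ij.1 ' '))
        (pattern.map (fun row => PySem.List.pyGetD row.toList ij.2 ' '))) 0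
    if num_diffs = accepted_diffs then idxs ++ [idx] else idxs) []
  if idxs.length = 1 then PySem.List.pyGet? idxs 0
  else if idxs.length = 0 then none
  else none  -- RuntimeError in Python: excluded by Pre_

-- ===== PORT B =====
def find_vertical_reflection_idx_alt (pattern : List String) (accepted_diffs : Int) : Option Int :=
  let n : Int := ((pattern.headD "").toList.length : Int)
  let idxs : List Int := (PySem.List.pyRange 0 (n - 1) 1).filter (fun idx =>
    (pattern.map (fun row =>
      ((PySem.List.slice row.toList none (some (idx + 1))).reverse.zip
        (PySem.List.slice row.toList (some (idx + 1)) (some n))).foldl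
        (fun acc ab => acc + (if ab.1 ≠ ab.2 then (1 : Int) else 0)) 0)).sum == accepted_diffs)
  if idxs.length > 1 then none  -- RuntimeError in Python: excluded by Pre_
  else if idxs.isEmpty then none
  else PySem.List.pyGet? idxs 0

-- ===== PRECONDITION & SPEC =====
-- number of mismatched cells across the reflection at axis idx of a width-w grid (spec form)
def pvAxisDiffs (pattern : List String) (w idx : Nat) : Int :=
  ((List.range (min (idx + 1) (w - idx - 1))).map (fun i =>
    ((pattern.map (fun row =>
      if row.toList.getD (idx - i) ' ' ≠ row.toList.getD (idx + 1 + i) ' ' then (1 : Int) else 0)).sum))).sum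

-- Pre_ excludes exactly the inputs where A raises: the empty pattern (IndexError on pattern[0]),
-- patterns with a row shorter than pattern[0] when the width is ≥ 2 (IndexError on row[i]),
-- and patterns with more than one matching axis (RuntimeError).
def Pre_find_vertical_reflection_idx (pattern : List String) (accepted_diffs : Int) : Prop :=
  pattern ≠ [] ∧
  (∀ row ∈ pattern, 2 ≤ (pattern.headD "").toList.length →
      (pattern.headD "").toList.length ≤ row.toList.length) ∧
  (List.range ((pattern.headD "").toList.length - 1)).countP
      (fun idx => pvAxisDiffs pattern (pattern.headD "").toList.length idx == accepted_diffs) ≤ 1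

instance (pattern : List String) (accepted_diffs : Int) : Decidable (Pre_find_vertical_reflection_idx pattern accepted_diffs) := by unfold Pre_find_vertical_reflection_idx; infer_instance

def pvWitness_find_vertical_reflection_idx : List String × Int := (["##."], 0)

def Spec_find_vertical_reflection_idx (pattern : List String) (accepted_diffs : Int) (out : Option Int) : Prop := out = find_vertical_reflection_idx_alt pattern accepted_diffs
instance (pattern : List String) (accepted_diffs : Int) (out : Option Int) : Decidable (Spec_find_vertical_reflection_idx pattern accepted_diffs out) := by unfold Spec_find_vertical_reflection_idx; infer_instance

-- ===== CLAIM (what is proved, stated in full; the proofs are below) =====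
def Claim_equal_find_vertical_reflection_idx : Prop := ∀ (pattern : List String) (accepted_diffs : Int), Dom_find_vertical_reflection_idx pattern accepted_diffs → Pre_find_vertical_reflection_idx pattern accepted_diffs → Spec_find_vertical_reflection_idx pattern accepted_diffs (find_vertical_reflection_idx pattern accepted_diffs)

-- ===== LEMMAS AND PROOFS =====

-- swap a nested list sum
lemma pv_sum_comm {α β : Type} (xs : List α) (ys : List β) (f : α → β → Int) :
    (xs.map fun x => (ys.map (f x)).sum).sum = (ys.map fun y => (xs.map fun x => f x y).sum).sum := by
  induction xs with
  | nil => simp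
  | cons x xs ih =>
      simp only [List.map_cons, List.sum_cons, ih]
      rw [← PySem.List.sum_map_add_int]

-- a range comprehension guarded by j < m is a map over the truncated range
lemma pv_filterMap_range {γ : Type} (f : Nat → γ) (m n : Nat) :
    (List.range n).filterMap (fun j => if j < m then some (f j) else none)
      = (List.range (min m n)).map f := by
  induction n with
  | zero => simp
  | succ n ih =>
      rw [List.range_succ, List.filterMap_append, ih]
      by_cases h : n < m
      · have : min m (n + 1) = min m n + 1 := by omega
        rw [this, List.range_succ, List.map_append]
        have : min m n = n := by omega
        simp [h, this]
      · have : min m (n + 1) = min m n := by omega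
        simp [h, this]

-- compare_fn's fold, characterised
lemma pv_compare_foldl (zs : List (Char × Char)) (d : Int) :
    zs.foldl (fun diff ab => if ab.1 = ab.2 then diff - 1 else diff) d
      = d - zs.length + (zs.map (fun ab => if ab.1 ≠ ab.2 then (1 : Int) else 0)).sum := by
  induction zs generalizing d with
  | nil => simp
  | cons ab zs ih =>
      by_cases h : ab.1 = ab.2 <;> simp [h, ih] <;> ring

lemma pv_compare_fn_eq (xs ys : List Char) (h : xs.length = ys.length) :
    compare_fn xs ys = ((xs.zip ys).map (fun ab => if ab.1 ≠ ab.2 then (1 : Int) else 0)).sum := by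
  unfold compare_fn
  rw [pv_compare_foldl]
  have : (xs.zip ys).length = xs.length := by simp [h]
  rw [this]; ring

-- A's cols_to_compare list at axis k
lemma pv_cols_eq (w k : Nat) :
    ((PySem.List.pyRange 0 ((k : Int) + 1) 1).filterMap (fun i =>
        if (k : Int) - i ≥ 0 ∧ (k : Int) + i + 1 < (w : Int) then
          some ((k : Int) - i, (k : Int) + i + 1) else none))
      = (List.range (min (k + 1) (w - k - 1))).map
          (fun j => (((k - j : Nat) : Int), ((k + 1 + j : Nat) : Int))) := by
  have hcast : (k : Int) + 1 = ((k + 1 : Nat) : Int) := by omega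
  rw [hcast, PySem.List.pyRange_zero_natCast, List.filterMap_map,
    show min (k + 1) (w - k - 1) = min (w - k - 1) (k + 1) from Nat.min_comm _ _]
  rw [← pv_filterMap_range (fun j => (((k - j : Nat) : Int), ((k + 1 + j : Nat) : Int))) (w - k - 1) (k + 1)]
  apply List.filterMap_congr
  intro j hj
  have hjk : j ≤ k := by
    have := List.mem_range.mp hj; omega
  by_cases h : j < w - k - 1
  · have h1 : (k : Int) - (j : Int) ≥ 0 ∧ (k : Int) + (j : Int) + 1 < (w : Int) := by
      constructor <;> [omega; omega]
    simp only [Function.comp_apply, if_pos h1, if_pos h, Option.some.injEq, Prod.mk.injEq]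
    constructor <;> omega
  · have h1 : ¬ ((k : Int) - (j : Int) ≥ 0 ∧ (k : Int) + (j : Int) + 1 < (w : Int)) := by
      intro hc; omega
    simp only [Function.comp_apply, if_neg h1, if_neg h]

-- A's num_diffs at axis k equals the spec count
lemma pv_numA_eq (pattern : List String) (w k : Nat) :
    (((PySem.List.pyRange 0 ((k : Int) + 1) 1).filterMap (fun i =>
        if (k : Int) - i ≥ 0 ∧ (k : Int) + i + 1 < (w : Int) then
          some ((k : Int) - i, (k : Int) + i + 1) else none)).foldl
      (fun acc ij => acc + compare_fn
          (pattern.map (fun row => PySem.List.pyGetD row.toList ij.1 ' '))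
          (pattern.map (fun row => PySem.List.pyGetD row.toList ij.2 ' '))) 0)
      = pvAxisDiffs pattern w k := by
  rw [pv_cols_eq w k, PySem.List.foldl_add, zero_add, List.map_map]
  unfold pvAxisDiffs
  apply congrArg
  apply List.map_congr_left
  intro j hj
  simp only [Function.comp_apply]
  rw [pv_compare_fn_eq _ _ (by simp), List.zip_map', List.map_map]
  apply congrArg
  apply List.map_congr_left
  intro row _
  simp only [Function.comp_apply]
  rw [PySem.List.pyGetD_of_nonneg _ _ (by positivity),
      PySem.List.pyGetD_of_nonneg _ _ (by positivity)]
  have h3 : (((k - j : Nat) : Int)).toNat = k - j := by omega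
  have h4 : (((k + 1 + j : Nat) : Int)).toNat = k + 1 + j := by omega
  rw [h3, h4]

-- B's zipped row slices at axis k
lemma pv_rowzip_eq (L : List Char) (w k : Nat) (hk : k + 1 < w) (hL : w ≤ L.length) :
    ((PySem.List.slice L none (some ((k : Int) + 1))).reverse.zip
        (PySem.List.slice L (some ((k : Int) + 1)) (some (w : Int))))
      = (List.range (min (k + 1) (w - k - 1))).map
          (fun j => (L.getD (k - j) ' ', L.getD (k + 1 + j) ' ')) := by
  have hcast : (k : Int) + 1 = ((k + 1 : Nat) : Int) := by omega
  rw [hcast, PySem.List.slice_to_natCast, PySem.List.slice_natCast]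
  apply List.ext_getElem
  · simp; omega
  · intro j h1 h2
    have hj : j < min (k + 1) (w - k - 1) := by simp at h2; omega
    rw [List.getElem_zip, List.getElem_reverse, List.getElem_map, List.getElem_range]
    have hlt : k - j < L.length := by omega
    have hlt2 : k + 1 + j < L.length := by omega
    simp only [List.getElem_take, List.getElem_drop, List.length_take]
    rw [List.getD_eq_getElem L ' ' hlt, List.getD_eq_getElem L ' ' hlt2]
    have e1 : min (k + 1) L.length - 1 - j = k - j := by omega
    rw [getElem_congr rfl e1 (by omega)]

-- B's per-axis sum equals the spec count
lemma pv_sumB_eq (pattern : List String) (w k : Nat) (hk : k + 1 < w)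
    (hrows : ∀ row ∈ pattern, w ≤ row.toList.length) :
    (pattern.map (fun row =>
        ((PySem.List.slice row.toList none (some ((k : Int) + 1))).reverse.zip
          (PySem.List.slice row.toList (some ((k : Int) + 1)) (some (w : Int)))).foldl
          (fun acc ab => acc + (if ab.1 ≠ ab.2 then (1 : Int) else 0)) 0)).sum
      = pvAxisDiffs pattern w k := by
  have step : ∀ row ∈ pattern,
      ((PySem.List.slice row.toList none (some ((k : Int) + 1))).reverse.zip
          (PySem.List.slice row.toList (some ((k : Int) + 1)) (some (w : Int)))).foldl
          (fun acc ab => acc + (if ab.1 ≠ ab.2 then (1 : Int) else 0)) 0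
        = ((List.range (min (k + 1) (w - k - 1))).map
            (fun j => if row.toList.getD (k - j) ' ' ≠ row.toList.getD (k + 1 + j) ' ' then (1 : Int) else 0)).sum := by
    intro row hrow
    rw [PySem.List.foldl_add, zero_add, pv_rowzip_eq row.toList w k hk (hrows row hrow), List.map_map]
    rfl
  rw [List.map_congr_left step]
  unfold pvAxisDiffs
  rw [pv_sum_comm pattern (List.range (min (k + 1) (w - k - 1)))
      (fun row j => if row.toList.getD (k - j) ' ' ≠ row.toList.getD (k + 1 + j) ' ' then (1 : Int) else 0)]

-- A's append-if fold with a propositional equality test is a filter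
lemma pv_foldl_append_ite (l : List Int) (q : Int → Int) (ad : Int) (acc : List Int) :
    l.foldl (fun idxs idx => if q idx = ad then idxs ++ [idx] else idxs) acc
      = acc ++ l.filter (fun idx => q idx == ad) := by
  induction l generalizing acc with
  | nil => simp
  | cons x l ih =>
      by_cases h : q x = ad <;> simp [h, ih]

-- ===== VERDICT (by name: the statement is the Claim_ definition above) =====
theorem find_vertical_reflection_idx_spec : Claim_equal_find_vertical_reflection_idx := by
  intro pattern ad _ hpre
  obtain ⟨hne, hlenpre, hcount⟩ := hpre
  unfold Spec_find_vertical_reflection_idx find_vertical_reflection_idx find_vertical_reflection_idx_alt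
  set w := (pattern.headD "").toList.length with hw
  by_cases hsmall : w ≤ 1
  · have hnil : PySem.List.pyRange 0 ((w : Int) - 1) 1 = [] :=
      PySem.List.pyRange_one_eq_nil (by omega)
    simp [hnil]
  · have hw2 : 2 ≤ w := by omega
    have hrows : ∀ row ∈ pattern, w ≤ row.toList.length := fun r hr => hlenpre r hr hw2
    have hrange : PySem.List.pyRange 0 ((w : Int) - 1) 1 = (List.range (w - 1)).map (fun k : Nat => (k : Int)) := by
      rw [show ((w : Int) - 1) = ((w - 1 : Nat) : Int) by omega]
      exact PySem.List.pyRange_zero_natCast _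
    dsimp only
    rw [hrange, pv_foldl_append_ite, List.nil_append, List.filter_map, List.filter_map]
    have hB : List.filter ((fun idx : Int =>
          (pattern.map (fun row =>
            ((PySem.List.slice row.toList none (some (idx + 1))).reverse.zip
              (PySem.List.slice row.toList (some (idx + 1)) (some (w : Int)))).foldl
              (fun acc ab => acc + (if ab.1 ≠ ab.2 then (1 : Int) else 0)) 0)).sum == ad)
          ∘ (fun k : Nat => (k : Int))) (List.range (w - 1))
        = List.filter (fun k => pvAxisDiffs pattern w k == ad) (List.range (w - 1)) := by
      apply List.filter_congr
      intro k hk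
      have hkw : k + 1 < w := by have := List.mem_range.mp hk; omega
      simp only [Function.comp_apply]
      rw [pv_sumB_eq pattern w k hkw hrows]
    rw [hB]
    simp only [Function.comp_def]
    simp only [pv_numA_eq]
    set F := List.filter (fun k => pvAxisDiffs pattern w k == ad) (List.range (w - 1)) with hF
    have hFlen : F.length ≤ 1 := by
      rw [hF, ← List.countP_eq_length_filter]
      exact hcount
    cases hc : F with
    | nil => simp
    | cons a t =>
        cases t with
        | nil => simp [PySem.List.pyGet?]
        | cons b t2 => rw [hc] at hFlen; simp at hFlen
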